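-- pv_equiv track=rewrite | github.com/starfall1228/UBS-Challenge | routes/bug2.py | max_bugsfixed
-- ===== SOURCE A (Python) =====
-- import heapq
--
-- def max_bugsfixed(bugseq):
--     # Sort bugs by their escalation limits
--     bugseq.sort(key=lambda x: x[1])
--
--     current_time = 0
--     max_heap = []
--
--     for difficulty, limit in bugseq:
--         if current_time + difficulty <= limit:
--             heapq.heappush(max_heap, -difficulty)
--             current_time += difficulty
--         elif max_heap and -max_heap[0] > difficulty:
--             current_time += difficulty + heapq.heappop(max_heap)
--             heapq.heappush(max_heap, -difficulty)
--
--     return len(max_heap)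
-- ===== SOURCE B (Python) =====
-- def max_bugsfixed(bugseq):
--     # Same greedy schedule, but the chosen set is a plain list with a max() scan
--     # instead of a heap of negated difficulties. (Sorts bugseq in place, like A.)
--     bugseq.sort(key=lambda x: x[1])
--
--     current_time = 0
--     selected = []
--
--     for difficulty, limit in bugseq:
--         if current_time + difficulty <= limit:
--             selected.append(difficulty)
--             current_time += difficulty
--         elif selected:
--             m = max(selected)
--             if m > difficulty:
--                 current_time += difficulty - m
--                 selected.remove(m)
--                 selected.append(difficulty)
--
--     return len(selected)
-- ===== Notes on version B (the rewrite author's own statement) =====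
-- stated objective: simpler
-- what changed: Replaces the heap of negated difficulties with a plain list of chosen difficulties: the eviction step finds the maximum by a max() scan and removes it with list.remove, so no heap operations or sign flipping are needed.
import Mathlib
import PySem

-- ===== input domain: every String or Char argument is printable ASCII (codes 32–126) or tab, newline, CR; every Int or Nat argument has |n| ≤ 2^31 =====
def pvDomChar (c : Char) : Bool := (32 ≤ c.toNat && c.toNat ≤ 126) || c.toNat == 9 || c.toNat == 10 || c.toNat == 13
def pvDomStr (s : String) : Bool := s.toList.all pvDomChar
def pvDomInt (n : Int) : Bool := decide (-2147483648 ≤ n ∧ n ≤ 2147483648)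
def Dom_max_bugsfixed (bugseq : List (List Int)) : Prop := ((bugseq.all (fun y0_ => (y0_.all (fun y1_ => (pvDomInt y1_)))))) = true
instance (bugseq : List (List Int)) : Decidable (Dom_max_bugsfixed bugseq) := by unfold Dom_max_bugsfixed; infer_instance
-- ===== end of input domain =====

-- B replaces A's heap of negated difficulties with a plain list of chosen
-- difficulties scanned by max(); equivalence is about the RETURN value only
-- (both A and B sort bugseq in place the same way).

-- ===== PORT A =====
-- heapq.heappush modelled as ordered insertion (the heap is only observed
-- through its minimum max_heap[0], heappop of that minimum, and its length,
-- all of which this model reproduces exactly)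
def pvHeapPush (x : Int) : List Int → List Int
  | [] => [x]
  | y :: ys => if x ≤ y then x :: y :: ys else y :: pvHeapPush x ys

def pvALoop : List (List Int) → Int → List Int → List Int
  | [], _, heap => heap
  | [d, lim] :: rest, t, heap =>
      if t + d ≤ lim then
        pvALoop rest (t + d) (pvHeapPush (-d) heap)
      else
        match heap with
        | h :: hs =>
            if -h > d then pvALoop rest (t + d + h) (pvHeapPush (-d) hs)
            else pvALoop rest t heap
        | [] => pvALoop rest t heap
  | _ :: rest, t, heap => pvALoop rest t heap  -- unreachable under Pre_ (Python raises)

def max_bugsfixed (bugseq : List (List Int)) : Int :=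
  ((pvALoop (PySem.List.sorted bugseq (fun x => x.getD 1 0) false) 0 []).length : Int)

-- ===== PORT B =====
def pvBLoop : List (List Int) → Int → List Int → List Int
  | [], _, sel => sel
  | [d, lim] :: rest, t, sel =>
      if t + d ≤ lim then
        pvBLoop rest (t + d) (sel ++ [d])
      else
        match PySem.List.max? sel (fun x => x) with
        | some m =>
            if m > d then
              match PySem.List.remove? sel m with
              | some s => pvBLoop rest (t + d - m) (s ++ [d])
              | none => pvBLoop rest t sel    -- unreachable: max(selected) ∈ selected
            else pvBLoop rest t sel
        | none => pvBLoop rest t sel          -- 'elif selected' guard: empty list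
  | _ :: rest, t, sel => pvBLoop rest t sel   -- unreachable under Pre_ (Python raises)

def max_bugsfixed_alt (bugseq : List (List Int)) : Int :=
  ((pvBLoop (PySem.List.sorted bugseq (fun x => x.getD 1 0) false) 0 []).length : Int)

-- ===== PRECONDITION & SPEC =====
-- Pre_ excludes exactly the inputs on which the Python A raises: any row that is
-- not a pair makes 'key=lambda x: x[1]' or the 'difficulty, limit' unpacking fail.
def Pre_max_bugsfixed (bugseq : List (List Int)) : Prop :=
  ∀ l ∈ bugseq, l.length = 2
instance (bugseq : List (List Int)) : Decidable (Pre_max_bugsfixed bugseq) := by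
  unfold Pre_max_bugsfixed; infer_instance

def pvWitness_max_bugsfixed : List (List Int) := [[2, 3], [1, 2], [4, 5]]

def Spec_max_bugsfixed (bugseq : List (List Int)) (out : Int) : Prop := out = max_bugsfixed_alt bugseq
instance (bugseq : List (List Int)) (out : Int) : Decidable (Spec_max_bugsfixed bugseq out) := by unfold Spec_max_bugsfixed; infer_instance

-- ===== CLAIM (what is proved, stated in full; the proofs are below) =====
def Claim_equal_max_bugsfixed : Prop := ∀ (bugseq : List (List Int)), Dom_max_bugsfixed bugseq → Pre_max_bugsfixed bugseq → Spec_max_bugsfixed bugseq (max_bugsfixed bugseq)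

-- ===== LEMMAS AND PROOFS =====

lemma pvHeapPush_perm (x : Int) (h : List Int) : (pvHeapPush x h).Perm (x :: h) := by
  induction h with
  | nil => simp [pvHeapPush]
  | cons y ys ih =>
      simp only [pvHeapPush]
      split
      · exact List.Perm.refl _
      · exact (ih.cons y).trans (List.Perm.swap x y ys)

lemma pvHeapPush_sorted (x : Int) (h : List Int) (hs : h.Pairwise (· ≤ ·)) :
    (pvHeapPush x h).Pairwise (· ≤ ·) := by
  induction h with
  | nil => simp [pvHeapPush]
  | cons y ys ih =>
      rcases List.pairwise_cons.mp hs with ⟨hy, hys⟩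
      simp only [pvHeapPush]
      split
      · rename_i hle
        refine List.pairwise_cons.mpr ⟨?_, hs⟩
        intro a ha
        rcases List.mem_cons.mp ha with rfl | ha
        · exact hle
        · exact le_trans hle (hy a ha)
      · rename_i hgt
        refine List.pairwise_cons.mpr ⟨?_, ih hys⟩
        intro a ha
        rcases List.mem_cons.mp ((pvHeapPush_perm x ys).mem_iff.mp ha) with rfl | ha
        · omega
        · exact hy a ha

-- core invariant: the heap is (as a multiset) the negation of the selected list
lemma pvLoop_eq (xs : List (List Int)) : ∀ (t : Int) (heap sel : List Int),
    heap.Pairwise (· ≤ ·) → heap.Perm (sel.map (fun v => -v)) →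
    (pvALoop xs t heap).length = (pvBLoop xs t sel).length := by
  induction xs with
  | nil =>
      intro t heap sel _ hperm
      simpa [pvALoop, pvBLoop] using hperm.length_eq
  | cons l rest ih =>
      intro t heap sel hsorted hperm
      rcases l with _ | ⟨d, _ | ⟨lim, _ | ⟨z, zs⟩⟩⟩
      · exact ih t heap sel hsorted hperm
      · exact ih t heap sel hsorted hperm
      · -- the [d, lim] row
        simp only [pvALoop, pvBLoop]
        split
        · -- fits within limit: push / append
          exact ih (t + d) _ _ (pvHeapPush_sorted _ _ hsorted)
            ((pvHeapPush_perm (-d) heap).trans (by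
              simpa [List.map_append] using
                (hperm.cons (-d)).trans (List.perm_append_singleton (-d) _).symm))
        · -- eviction branch
          cases hheap : heap with
          | nil =>
              have hsel : sel = [] := by
                have := hperm.length_eq
                simp [hheap] at this
                simpa using this.symm
              subst hsel
              simpa [PySem.List.max?] using ih t [] [] List.Pairwise.nil (by simp)
          | cons h hs =>
              have hne : sel ≠ [] := by
                intro hnil
                rw [hnil, hheap] at hperm
                simpa using hperm.length_eq
              obtain ⟨m, hm⟩ : ∃ m, PySem.List.max? sel (fun x => x) = some m := by
                cases hmx : PySem.List.max? sel (fun x => x) with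
                | none => exact absurd ((PySem.List.max?_eq_none_iff sel (fun x => x)).mp hmx) hne
                | some m => exact ⟨m, rfl⟩
              have hmmem : m ∈ sel := PySem.List.max?_mem hm
              have hmmax : ∀ y ∈ sel, y ≤ m := by
                intro y hy; exact PySem.List.max?_isMax hm y hy
              -- the heap head equals -m
              have hheadle : ∀ x ∈ heap, h ≤ x := by
                intro x hx
                rw [hheap] at hsorted hx
                rcases List.mem_cons.mp hx with rfl | hx
                · exact le_refl x
                · exact (List.pairwise_cons.mp hsorted).1 x hx
              have hhm : h = -m := by
                have h1 : h ≤ -m := hheadle _ (hperm.mem_iff.mpr (List.mem_map.mpr ⟨m, hmmem, rfl⟩))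
                have h2 : -m ≤ h := by
                  have : h ∈ sel.map (fun v => -v) := hperm.mem_iff.mp (by simp [hheap])
                  rcases List.mem_map.mp this with ⟨s, hsmem, rfl⟩
                  have := hmmax s hsmem
                  omega
                omega
              subst hhm
              rw [hm]
              dsimp only
              by_cases hgt : m > d
              · have hA : -(-m) > d := by omega
                rw [if_pos hA, if_pos hgt,
                    PySem.List.remove?_eq_some_erase sel m hmmem]
                have htail : hs.Perm ((sel.erase m).map (fun v => -v)) := by
                  have h1 : hs = heap.erase (-m) := by simp [hheap]
                  have h2 : (sel.erase m).map (fun v => -v)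
                      = (sel.map (fun v => -v)).erase (-m) :=
                    List.map_erase (f := fun v : Int => -v) neg_injective sel
                  rw [h1, h2]
                  exact hperm.erase (-m)
                have hrec := ih (t + d + -m) (pvHeapPush (-d) hs) (sel.erase m ++ [d])
                  (pvHeapPush_sorted _ _ (by
                    rw [hheap] at hsorted; exact (List.pairwise_cons.mp hsorted).2))
                  ((pvHeapPush_perm (-d) hs).trans (by
                    simpa [List.map_append] using (htail.cons (-d)).trans
                      (List.perm_append_singleton (-d) _).symm))
                simpa [show t + d + -m = t + d - m by ring] using hrec
              · have hA : ¬ (-(-m) > d) := by omega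
                rw [if_neg hA, if_neg hgt]
                exact ih t (-m :: hs) sel (hheap ▸ hsorted) (hheap ▸ hperm)
      · exact ih t heap sel hsorted hperm

-- ===== VERDICT (by name: the statement is the Claim_ definition above) =====
theorem max_bugsfixed_spec : Claim_equal_max_bugsfixed := by
  intro bugseq _ _
  unfold Spec_max_bugsfixed max_bugsfixed max_bugsfixed_alt
  exact_mod_cast pvLoop_eq (PySem.List.sorted bugseq (fun x => x.getD 1 0) false)
    0 [] [] (by simp) (by simp)
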